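-- pv_equiv track=rewrite | github.com/bernsblack/masters | utils/data_processing.py | get_interval_times
-- ===== SOURCE A (Python) =====
-- def get_interval_times(a):
--     """
--     given array with true false occurrences given number of indices between each true occurence
--     """
--     t = []
--     prev_idx = 0
--     for cur_idx in range(len(a)):
--         if a[cur_idx]:
--             t.append(cur_idx - prev_idx)
--             prev_idx = cur_idx
--     return t
-- ===== SOURCE B (Python) =====
-- def get_interval_times(a):
--     """
--     given array with true false occurrences given number of indices between each true occurence
--     """
--     # phase 1: index table of truthy positions
--     idx = [i for i, x in enumerate(a) if x]
--     # phase 2: pairwise differences against a prepended 0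
--     return [j - i for i, j in zip([0] + idx, idx)]
-- ===== Notes on version B (the rewrite author's own statement) =====
-- stated objective: alternative
-- what changed: Replaces the single stateful scan tracking prev_idx with two separate passes: collect the truthy indices into a table, then take pairwise differences against a prepended 0.
import Mathlib
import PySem

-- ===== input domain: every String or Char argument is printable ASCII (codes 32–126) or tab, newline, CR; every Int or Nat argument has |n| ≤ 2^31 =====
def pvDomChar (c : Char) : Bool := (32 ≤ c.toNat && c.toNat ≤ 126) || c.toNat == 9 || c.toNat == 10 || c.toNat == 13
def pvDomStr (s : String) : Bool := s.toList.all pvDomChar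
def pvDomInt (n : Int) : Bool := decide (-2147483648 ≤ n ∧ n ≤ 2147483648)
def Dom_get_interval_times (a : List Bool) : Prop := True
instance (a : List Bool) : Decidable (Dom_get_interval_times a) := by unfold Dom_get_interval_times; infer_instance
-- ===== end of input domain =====

-- B replaces A's single stateful prev_idx scan by an index-table pass plus a pairwise-difference pass (alternative decomposition, same cost).

-- ===== PORT A =====
-- the for-loop over range(len(a)): structural recursion carrying cur_idx, prev_idx and the accumulator t
def get_interval_times_go : List Bool → Int → Int → List Int → List Int
  | [], _, _, t => t
  | b :: rest, cur, prev, t =>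
      if b then get_interval_times_go rest (cur + 1) cur (t ++ [cur - prev])
      else get_interval_times_go rest (cur + 1) prev t

def get_interval_times (a : List Bool) : List Int :=
  get_interval_times_go a 0 0 []

-- ===== PORT B =====
def get_interval_times_alt (a : List Bool) : List Int :=
  let idx : List Int := (PySem.List.enumerate a).filterMap (fun p => if p.2 then some p.1 else none)
  (List.zip ((0 : Int) :: idx) idx).map (fun p => p.2 - p.1)

-- ===== PRECONDITION & SPEC =====
def Spec_get_interval_times (a : List Bool) (out : List Int) : Prop := out = get_interval_times_alt a
instance (a : List Bool) (out : List Int) : Decidable (Spec_get_interval_times a out) := by unfold Spec_get_interval_times; infer_instance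

-- ===== CLAIM (what is proved, stated in full; the proofs are below) =====
def Claim_equal_get_interval_times : Prop := ∀ (a : List Bool), Dom_get_interval_times a → Spec_get_interval_times a (get_interval_times a)

-- ===== LEMMAS AND PROOFS =====

-- the truthy-index table starting at offset s
def pvIdx (l : List Bool) (s : Int) : List Int :=
  (PySem.List.enumerate l s).filterMap (fun p => if p.2 then some p.1 else none)

theorem pvIdx_cons (b : Bool) (l : List Bool) (s : Int) :
    pvIdx (b :: l) s = (if b then [s] else []) ++ pvIdx l (s + 1) := by
  simp [pvIdx, PySem.List.enumerate_cons]
  cases b <;> simp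

theorem go_eq (l : List Bool) (cur prev : Int) (t : List Int) :
    get_interval_times_go l cur prev t =
      t ++ (List.zip (prev :: pvIdx l cur) (pvIdx l cur)).map (fun p => p.2 - p.1) := by
  induction l generalizing cur prev t with
  | nil => simp [get_interval_times_go, pvIdx, PySem.List.enumerate_nil]
  | cons b rest ih =>
      cases b with
      | true =>
          simp only [get_interval_times_go, ih, pvIdx_cons]
          simp [List.zip]
      | false =>
          simp only [get_interval_times_go, ih, pvIdx_cons]
          simp

-- ===== VERDICT (by name: the statement is the Claim_ definition above) =====
theorem get_interval_times_spec : Claim_equal_get_interval_times := by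
  intro a _
  show get_interval_times a = get_interval_times_alt a
  simp [get_interval_times, get_interval_times_alt, go_eq, pvIdx]
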